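-- pv_equiv track=rewrite | github.com/chopdev/leetcode_tasks | dynamic_programming/CtCI_8_1_triple_step/Solution.py | get_possibilities_count2222
-- ===== SOURCE A (Python) =====
-- def get_possibilities_count2222(n: int) -> int:
--     if n == 1: return 1
--     if n == 2: return 2
--     if n == 3: return 3
--
--     first = 1
--     second = 2
--     third = 3
--     res = 0
--     for i in range(4, n + 1):
--         res = first + 1 + second + 2 + third + 3
--         first = second
--         second = third
--         third = res
--     return res
-- ===== SOURCE B (Python) =====
-- def get_possibilities_count2222(n: int) -> int:
--     if n <= 0:
--         return 0
--     if n <= 3: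
--         return n
--     # ways(m) = ways(m-1)+ways(m-2)+ways(m-3)+6; advance by binary matrix exponentiation
--     M = (0, 1, 0, 0,
--          0, 0, 1, 0,
--          1, 1, 1, 6,
--          0, 0, 0, 1)
--     I = (1, 0, 0, 0,
--          0, 1, 0, 0,
--          0, 0, 1, 0,
--          0, 0, 0, 1)
--
--     def mul(x, y):
--         return tuple(sum(x[4 * i + k] * y[4 * k + j] for k in range(4))
--                      for i in range(4) for j in range(4))
--
--     def matpow(m, k):
--         if k == 0:
--             return I
--         t = matpow(m, k // 2)
--         s = mul(t, t)
--         return mul(s, m) if k % 2 == 1 else s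
--
--     t = matpow(M, n - 3)
--     # third component of t applied to the seed vector (1, 2, 3, 1)
--     return t[8] * 1 + t[9] * 2 + t[10] * 3 + t[11] * 1
-- ===== Notes on version B (the rewrite author's own statement) =====
-- stated objective: faster
-- what changed: Replaced the linear dynamic-programming loop over range(4, n+1) with binary matrix exponentiation of the 4x4 companion matrix of the affine recurrence (state augmented with a constant-term component).
import Mathlib
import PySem

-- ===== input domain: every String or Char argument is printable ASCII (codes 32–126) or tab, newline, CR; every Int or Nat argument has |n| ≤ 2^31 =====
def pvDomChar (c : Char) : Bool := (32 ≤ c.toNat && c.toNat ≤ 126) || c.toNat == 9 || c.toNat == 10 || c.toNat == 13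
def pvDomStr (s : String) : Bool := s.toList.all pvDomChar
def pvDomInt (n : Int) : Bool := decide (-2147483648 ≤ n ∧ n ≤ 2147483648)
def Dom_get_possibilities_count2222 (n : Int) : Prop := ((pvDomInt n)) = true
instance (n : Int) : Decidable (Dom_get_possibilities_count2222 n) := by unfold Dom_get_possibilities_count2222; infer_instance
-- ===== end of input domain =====

-- B replaces A's linear loop by binary exponentiation of the recurrence's 4x4 companion matrix (objective: faster).

-- ===== PORT A =====
def get_possibilities_count2222 (n : Int) : Int :=
  if n = 1 then 1
  else if n = 2 then 2
  else if n = 3 then 3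
  else
    ((PySem.List.pyRange 4 (n + 1) 1).foldl
      (fun st _ =>
        let res := st.1 + 1 + st.2.1 + 2 + st.2.2.1 + 3
        (st.2.1, st.2.2.1, res, res))
      ((1 : Int), (2 : Int), (3 : Int), (0 : Int))).2.2.2

-- ===== PORT B =====
structure Mat where
  a11 : Int
  a12 : Int
  a13 : Int
  a14 : Int
  a21 : Int
  a22 : Int
  a23 : Int
  a24 : Int
  a31 : Int
  a32 : Int
  a33 : Int
  a34 : Int
  a41 : Int
  a42 : Int
  a43 : Int
  a44 : Int
deriving DecidableEq, Repr

-- hand-written 4x4 multiply, as in Source B's mul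
def matmul (x y : Mat) : Mat :=
  ⟨x.a11*y.a11 + x.a12*y.a21 + x.a13*y.a31 + x.a14*y.a41,
   x.a11*y.a12 + x.a12*y.a22 + x.a13*y.a32 + x.a14*y.a42,
   x.a11*y.a13 + x.a12*y.a23 + x.a13*y.a33 + x.a14*y.a43,
   x.a11*y.a14 + x.a12*y.a24 + x.a13*y.a34 + x.a14*y.a44,
   x.a21*y.a11 + x.a22*y.a21 + x.a23*y.a31 + x.a24*y.a41,
   x.a21*y.a12 + x.a22*y.a22 + x.a23*y.a32 + x.a24*y.a42,
   x.a21*y.a13 + x.a22*y.a23 + x.a23*y.a33 + x.a24*y.a43,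
   x.a21*y.a14 + x.a22*y.a24 + x.a23*y.a34 + x.a24*y.a44,
   x.a31*y.a11 + x.a32*y.a21 + x.a33*y.a31 + x.a34*y.a41,
   x.a31*y.a12 + x.a32*y.a22 + x.a33*y.a32 + x.a34*y.a42,
   x.a31*y.a13 + x.a32*y.a23 + x.a33*y.a33 + x.a34*y.a43,
   x.a31*y.a14 + x.a32*y.a24 + x.a33*y.a34 + x.a34*y.a44,
   x.a41*y.a11 + x.a42*y.a21 + x.a43*y.a31 + x.a44*y.a41,
   x.a41*y.a12 + x.a42*y.a22 + x.a43*y.a32 + x.a44*y.a42,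
   x.a41*y.a13 + x.a42*y.a23 + x.a43*y.a33 + x.a44*y.a43,
   x.a41*y.a14 + x.a42*y.a24 + x.a43*y.a34 + x.a44*y.a44⟩

def idMat : Mat := ⟨1,0,0,0, 0,1,0,0, 0,0,1,0, 0,0,0,1⟩

def stepM : Mat := ⟨0,1,0,0, 0,0,1,0, 1,1,1,6, 0,0,0,1⟩

-- binary exponentiation, as in Source B's matpow
def matpow (m : Mat) (k : Nat) : Mat :=
  if h : k = 0 then idMat
  else
    let t := matpow m (k / 2)
    let s := matmul t t
    if k % 2 = 1 then matmul s m else s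
decreasing_by exact Nat.div_lt_self (Nat.pos_of_ne_zero h) one_lt_two

def get_possibilities_count2222_alt (n : Int) : Int :=
  if n ≤ 0 then 0
  else if n ≤ 3 then n
  else
    let t := matpow stepM (n - 3).toNat
    t.a31 * 1 + t.a32 * 2 + t.a33 * 3 + t.a34 * 1

-- ===== PRECONDITION & SPEC =====
def Spec_get_possibilities_count2222 (n : Int) (out : Int) : Prop := out = get_possibilities_count2222_alt n
instance (n : Int) (out : Int) : Decidable (Spec_get_possibilities_count2222 n out) := by unfold Spec_get_possibilities_count2222; infer_instance

-- ===== CLAIM (what is proved, stated in full; the proofs are below) =====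
def Claim_equal_get_possibilities_count2222 : Prop := ∀ (n : Int), Dom_get_possibilities_count2222 n → Spec_get_possibilities_count2222 n (get_possibilities_count2222 n)

-- ===== LEMMAS AND PROOFS =====

-- simple (non-binary) matrix power, the bridge between the two ports
def prec (m : Mat) : Nat → Mat
  | 0 => idMat
  | k + 1 => matmul (prec m k) m

theorem matmul_one (m : Mat) : matmul m idMat = m := by
  cases m; simp only [matmul, idMat, Mat.mk.injEq]; and_intros <;> ring

theorem one_matmul (m : Mat) : matmul idMat m = m := by
  cases m; simp only [matmul, idMat, Mat.mk.injEq]; and_intros <;> ring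

theorem matmul_assoc (a b c : Mat) : matmul (matmul a b) c = matmul a (matmul b c) := by
  cases a; cases b; cases c; simp only [matmul, Mat.mk.injEq]; and_intros <;> ring

theorem prec_add (m : Mat) (a b : Nat) : prec m (a + b) = matmul (prec m a) (prec m b) := by
  induction b with
  | zero => simp [prec, matmul_one]
  | succ b ih =>
      show prec m (a + b + 1) = _
      rw [prec, ih, prec, matmul_assoc]

theorem prec_succ_left (m : Mat) (k : Nat) : prec m (k + 1) = matmul m (prec m k) := by
  have h := prec_add m 1 k
  simpa [prec, one_matmul, Nat.add_comm] using h

theorem matpow_eq_prec (m : Mat) (k : Nat) : matpow m k = prec m k := by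
  induction k using Nat.strong_induction_on with
  | _ k ih =>
    rw [matpow]
    by_cases h : k = 0
    · simp [h, prec]
    · have hk : k / 2 < k := Nat.div_lt_self (Nat.pos_of_ne_zero h) one_lt_two
      rw [dif_neg h]
      simp only [ih (k / 2) hk]
      rcases Nat.even_or_odd k with he | ho
      · have h0 : k % 2 = 0 := Nat.even_iff.mp he
        have h2 : ¬ k % 2 = 1 := by omega
        have hs : k / 2 + k / 2 = k := by omega
        rw [if_neg h2, ← prec_add, hs]
      · have h2 : k % 2 = 1 := Nat.odd_iff.mp ho
        have hs : k / 2 + k / 2 + 1 = k := by omega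
        rw [if_pos h2]
        conv_rhs => rw [← hs]
        rw [prec, prec_add]

-- apply a matrix to a column vector
def vapp (t : Mat) (v : Int × Int × Int × Int) : Int × Int × Int × Int :=
  (t.a11 * v.1 + t.a12 * v.2.1 + t.a13 * v.2.2.1 + t.a14 * v.2.2.2,
   t.a21 * v.1 + t.a22 * v.2.1 + t.a23 * v.2.2.1 + t.a24 * v.2.2.2,
   t.a31 * v.1 + t.a32 * v.2.1 + t.a33 * v.2.2.1 + t.a34 * v.2.2.2,
   t.a41 * v.1 + t.a42 * v.2.1 + t.a43 * v.2.2.1 + t.a44 * v.2.2.2)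

theorem vapp_matmul (a b : Mat) (v : Int × Int × Int × Int) :
    vapp (matmul a b) v = vapp a (vapp b v) := by
  cases a; cases b; obtain ⟨v1, v2, v3, v4⟩ := v
  simp only [vapp, matmul, Prod.mk.injEq]; and_intros <;> ring

theorem vapp_idMat (v : Int × Int × Int × Int) : vapp idMat v = v := by
  obtain ⟨v1, v2, v3, v4⟩ := v
  simp only [vapp, idMat, Prod.mk.injEq]; and_intros <;> ring

-- A's loop body
def astep (st : Int × Int × Int × Int) : Int × Int × Int × Int :=
  (st.2.1, st.2.2.1, st.1 + 1 + st.2.1 + 2 + st.2.2.1 + 3,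
    st.1 + 1 + st.2.1 + 2 + st.2.2.1 + 3)

-- the loop state agrees with the matrix-power vector componentwise
theorem invariant (k : Nat) :
    let w := vapp (prec stepM k) (1, 2, 3, 1)
    let s := astep^[k] (1, 2, 3, 0)
    s.1 = w.1 ∧ s.2.1 = w.2.1 ∧ s.2.2.1 = w.2.2.1 ∧ w.2.2.2 = 1 ∧
      (1 ≤ k → s.2.2.2 = w.2.2.1) := by
  induction k with
  | zero => simp [prec, vapp_idMat, Function.iterate_zero]
  | succ k ih =>
      obtain ⟨h1, h2, h3, h4, _⟩ := ih
      rw [prec_succ_left, vapp_matmul]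
      set w := vapp (prec stepM k) (1, 2, 3, 1) with hw
      obtain ⟨w1, w2, w3, w4⟩ := w
      simp only [Function.iterate_succ_apply', vapp, stepM, astep]
      simp only at h1 h2 h3 h4
      refine ⟨by omega, by omega, by omega, by omega, fun _ => by omega⟩

-- ===== VERDICT (by name: the statement is the Claim_ definition above) =====
theorem get_possibilities_count2222_spec : Claim_equal_get_possibilities_count2222 := by
  intro n _
  show get_possibilities_count2222 n = get_possibilities_count2222_alt n
  unfold get_possibilities_count2222 get_possibilities_count2222_alt
  by_cases h1 : n = 1
  · simp [h1]
  by_cases h2 : n = 2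
  · simp [h2]
  by_cases h3 : n = 3
  · simp [h3]
  simp only [h1, h2, h3, if_false]
  by_cases hle : n ≤ 0
  · have : n + 1 ≤ 4 := by omega
    rw [PySem.List.pyRange_one_eq_nil this]
    simp [hle]
  · have h4 : 4 ≤ n := by omega
    have hn0 : ¬ n ≤ 0 := by omega
    have hn3 : ¬ n ≤ 3 := by omega
    simp only [hn0, hn3, if_false]
    have hfold : ∀ (l : List Int) (s : Int × Int × Int × Int),
        l.foldl (fun st _ =>
            (st.2.1, st.2.2.1, st.1 + 1 + st.2.1 + 2 + st.2.2.1 + 3,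
              st.1 + 1 + st.2.1 + 2 + st.2.2.1 + 3)) s = astep^[l.length] s := by
      intro l
      induction l with
      | nil => intro s; rfl
      | cons x t ih => intro s; simp [List.foldl, ih, astep, Function.iterate_succ_apply]
    rw [hfold]
    rw [PySem.List.length_pyRange_one]
    have hk : (n + 1 - 4).toNat = (n - 3).toNat := by omega
    rw [hk]
    have h1k : 1 ≤ (n - 3).toNat := by omega
    have := invariant (n - 3).toNat
    obtain ⟨-, -, -, -, h5⟩ := this
    rw [matpow_eq_prec]
    have := h5 h1k
    simp only [vapp] at this ⊢
    rw [this]
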